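-- pv_equiv track=rewrite | github.com/HarisDevelopsAnything/PythonProgs | Ex3/diagonal/matrixOps.py | swapDiag
-- ===== SOURCE A (Python) =====
-- def swapDiag(mat):
--     for i in range(0,len(mat)):
--         for j in range(0, len(mat)):
--             if i==j:
--                 t= mat[i][j]
--                 mat[i][j]= mat[i][len(mat)-j-1]
--                 mat[i][len(mat)-j-1]= t
--     return mat
-- ===== SOURCE B (Python) =====
-- def swapDiag(mat):
--     # One swap per row, looping over the diagonal index only.
--     # Like A, mutates mat's rows in place and returns mat.
--     n = len(mat)
--     for i in range(n):
--         row = mat[i]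
--         row[i], row[n - 1 - i] = row[n - 1 - i], row[i]
--     return mat
-- ===== Notes on version B (the rewrite author's own statement) =====
-- stated objective: simpler
-- what changed: B drops A's inner scan over all column indices (whose body only ever fires at j==i) and does one swap per row in a single loop over the diagonal index.
import Mathlib
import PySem

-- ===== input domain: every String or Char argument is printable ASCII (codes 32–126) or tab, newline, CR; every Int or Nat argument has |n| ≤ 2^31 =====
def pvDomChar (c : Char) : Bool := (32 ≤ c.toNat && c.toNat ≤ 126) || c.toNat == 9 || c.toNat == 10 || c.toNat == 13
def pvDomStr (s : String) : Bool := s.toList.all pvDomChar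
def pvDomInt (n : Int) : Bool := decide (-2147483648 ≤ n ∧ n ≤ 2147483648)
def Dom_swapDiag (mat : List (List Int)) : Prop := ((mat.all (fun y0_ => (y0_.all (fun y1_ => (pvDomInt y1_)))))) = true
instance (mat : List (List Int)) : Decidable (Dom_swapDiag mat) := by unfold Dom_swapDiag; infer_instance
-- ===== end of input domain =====

-- B replaces A's nested scan over all (i,j) pairs (whose body only acts at j==i) by a
-- single loop over the diagonal index, one swap per row; both Pythons mutate mat's rows
-- in place (the equivalence proved here is about the returned value).


-- ===== PORT A =====
-- inner-loop body: 'if i==j: t=mat[i][j]; mat[i][j]=mat[i][len(mat)-j-1]; mat[i][len(mat)-j-1]=t'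
def swapDiagInner (i : Int) (m2 : List (List Int)) (j : Int) : List (List Int) :=
  if i == j then
    let t := PySem.List.pyGetD (PySem.List.pyGetD m2 i []) j 0
    let m3 := PySem.List.pySetD m2 i
      (PySem.List.pySetD (PySem.List.pyGetD m2 i []) j
        (PySem.List.pyGetD (PySem.List.pyGetD m2 i []) ((m2.length : Int) - j - 1) 0))
    PySem.List.pySetD m3 i
      (PySem.List.pySetD (PySem.List.pyGetD m3 i []) ((m3.length : Int) - j - 1) t)
  else m2

-- outer-loop body: 'for j in range(0, len(mat)): …'
def swapDiagOuter (m : List (List Int)) (i : Int) : List (List Int) :=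
  (PySem.List.pyRange 0 (m.length : Int) 1).foldl (swapDiagInner i) m

def swapDiag (mat : List (List Int)) : List (List Int) :=
  (PySem.List.pyRange 0 (mat.length : Int) 1).foldl swapDiagOuter mat

-- ===== PORT B =====
-- loop body: 'row = mat[i]; row[i], row[n-1-i] = row[n-1-i], row[i]'
def swapDiagAltStep (n : Int) (m : List (List Int)) (i : Int) : List (List Int) :=
  let row := PySem.List.pyGetD m i []
  let a := PySem.List.pyGetD row (n - 1 - i) 0
  let b := PySem.List.pyGetD row i 0
  PySem.List.pySetD m i (PySem.List.pySetD (PySem.List.pySetD row i a) (n - 1 - i) b)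

def swapDiag_alt (mat : List (List Int)) : List (List Int) :=
  let n : Int := (mat.length : Int)
  (PySem.List.pyRange 0 n 1).foldl (swapDiagAltStep n) mat

-- ===== PRECONDITION & SPEC =====
-- Pre_ excludes exactly the inputs where A raises IndexError: some row i is too short
-- to hold both diagonal positions i and n-1-i (B raises there too).
def Pre_swapDiag (mat : List (List Int)) : Prop :=
  ∀ i ∈ List.range mat.length,
    i < (mat.getD i []).length ∧ mat.length - 1 - i < (mat.getD i []).length
instance (mat : List (List Int)) : Decidable (Pre_swapDiag mat) := by unfold Pre_swapDiag; infer_instance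

def pvWitness_swapDiag : List (List Int) := [[1, 2], [3, 4]]

def Spec_swapDiag (mat : List (List Int)) (out : List (List Int)) : Prop := out = swapDiag_alt mat
instance (mat : List (List Int)) (out : List (List Int)) : Decidable (Spec_swapDiag mat out) := by unfold Spec_swapDiag; infer_instance

-- ===== CLAIM (what is proved, stated in full; the proofs are below) =====
def Claim_equal_swapDiag : Prop := ∀ (mat : List (List Int)), Dom_swapDiag mat → Pre_swapDiag mat → Spec_swapDiag mat (swapDiag mat)

-- ===== LEMMAS AND PROOFS =====

theorem foldl_skip {α β : Type} (f : β → α → β) (l : List α) (init : β)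
    (h : ∀ acc x, x ∈ l → f acc x = acc) : l.foldl f init = init := by
  induction l generalizing init with
  | nil => rfl
  | cons x xs ih =>
    simp only [List.foldl_cons]
    rw [h init x (by simp), ih]
    intro acc y hy; exact h acc y (by simp [hy])

-- invariant preserved by both loops: the shape (all row lengths) of the matrix is unchanged
def pvInv (mat m : List (List Int)) : Prop :=
  m.length = mat.length ∧ ∀ k, k < mat.length → (m.getD k []).length = (mat.getD k []).length

theorem step_shape (n : Int) (mat m : List (List Int)) (i : Int) (h0 : 0 ≤ i)
    (hinv : pvInv mat m) : pvInv mat (swapDiagAltStep n m i) := by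
  obtain ⟨hl, hr⟩ := hinv
  simp only [swapDiagAltStep]
  rw [PySem.List.pySetD_of_nonneg _ _ h0]
  refine ⟨by simp [hl], ?_⟩
  intro k hk
  by_cases hki : k = i.toNat
  · rw [hki]
    by_cases hkl : i.toNat < m.length
    · rw [List.getD_eq_getElem?_getD, List.getElem?_set_self (by omega), Option.getD_some]
      rw [PySem.List.length_pySetD, PySem.List.length_pySetD]
      rw [PySem.List.pyGetD_of_nonneg _ _ h0]
      exact hr i.toNat (hki ▸ hk)
    · rw [List.set_eq_of_length_le (by omega)]
      exact hr i.toNat (hki ▸ hk)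
  · rw [List.getD_eq_getElem?_getD, List.getElem?_set_ne (by omega),
      ← List.getD_eq_getElem?_getD]
    exact hr k hk

theorem inner_collapse (mat m : List (List Int)) (i : Int) (h0 : 0 ≤ i)
    (hlt : i.toNat < mat.length) (hinv : pvInv mat m) :
    swapDiagOuter m i = swapDiagAltStep (mat.length : Int) m i := by
  obtain ⟨hl, hr⟩ := hinv
  obtain ⟨k, rfl⟩ : ∃ k : Nat, i = (k : Int) := ⟨i.toNat, by omega⟩
  have hk : k < mat.length := by omega
  have hm : k < m.length := by omega
  unfold swapDiagOuter
  have hsplit : PySem.List.pyRange 0 (m.length : Int) 1 =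
      PySem.List.pyRange 0 (k : Int) 1 ++ ((k : Int) :: PySem.List.pyRange ((k : Int) + 1) (m.length : Int) 1) := by
    rw [PySem.List.pyRange_one_append 0 (k : Int) (m.length : Int) h0 (by omega)]
    congr 1
    exact PySem.List.pyRange_one_cons (by omega)
  rw [hsplit, List.foldl_append]
  rw [foldl_skip _ _ m (by
    intro acc x hx
    have := (PySem.List.mem_pyRange_one).1 hx
    simp only [swapDiagInner, if_neg (by simp; omega : ¬ (((k:Int) == x) = true))])]
  simp only [List.foldl_cons]
  rw [foldl_skip _ _ _ (by
    intro acc x hx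
    have := (PySem.List.mem_pyRange_one).1 hx
    simp only [swapDiagInner, if_neg (by simp; omega : ¬ (((k:Int) == x) = true))])]
  -- the single fired iteration (j = i) is exactly B's one swap
  simp only [swapDiagInner, swapDiagAltStep, beq_self_eq_true, if_true]
  simp only [PySem.List.pySetD_natCast, PySem.List.pyGetD_natCast, List.length_set]
  have hcast : ((m.length : Int) - (k : Int) - 1) = ((m.length - k - 1 : Nat) : Int) := by omega
  have hcast2 : ((mat.length : Int) - 1 - (k : Int)) = ((m.length - k - 1 : Nat) : Int) := by omega
  rw [hcast, hcast2]
  simp only [PySem.List.pySetD_natCast, PySem.List.pyGetD_natCast]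
  generalize (m.getD k []).set k ((m.getD k []).getD (m.length - k - 1) 0) = r
  have hget : (m.set k r).getD k [] = r := by
    rw [List.getD_eq_getElem?_getD, List.getElem?_set_self (by omega), Option.getD_some]
  rw [hget, List.set_set]

theorem fold_eq (mat : List (List Int)) (l : List Int) :
    ∀ (m : List (List Int)), (∀ i ∈ l, 0 ≤ i ∧ i.toNat < mat.length) → pvInv mat m →
      l.foldl swapDiagOuter m = l.foldl (swapDiagAltStep (mat.length : Int)) m := by
  induction l with
  | nil => intro m _ _; rfl
  | cons i t ih =>
    intro m hmem hinv
    obtain ⟨h0, hlt⟩ := hmem i (by simp)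
    simp only [List.foldl_cons]
    rw [inner_collapse mat m i h0 hlt hinv]
    exact ih _ (fun j hj => hmem j (by simp [hj])) (step_shape _ mat m i h0 hinv)

-- ===== VERDICT (by name: the statement is the Claim_ definition above) =====
theorem swapDiag_spec : Claim_equal_swapDiag := by
  intro mat _ _
  unfold Spec_swapDiag swapDiag swapDiag_alt
  refine fold_eq mat _ mat ?_ ⟨rfl, fun _ _ => rfl⟩
  intro i hi
  have := (PySem.List.mem_pyRange_one).1 hi
  omega
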